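-- pv_equiv track=rewrite | github.com/shalavik/SEO | src/seo_leads/processors/production_executive_pipeline.py | _extract_title_from_context
-- ===== SOURCE A (Python) =====
-- def _extract_title_from_context(context: str, name: str) -> str:
--     """Extract executive title from context"""
--     context_lower = context.lower()
--
--     # Executive title patterns
--     if any(word in context_lower for word in ['owner', 'proprietor']):
--         return 'Owner'
--     elif any(word in context_lower for word in ['director', 'managing']):
--         return 'Director'
--     elif any(word in context_lower for word in ['manager', 'lead']):
--         return 'Manager'
--     elif any(word in context_lower for word in ['founder', 'established']):
--         return 'Founder'
--     elif any(word in context_lower for word in ['ceo', 'president']):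
--         return 'CEO'
--     else:
--         return 'Executive'
-- ===== SOURCE B (Python) =====
-- # Text-driven single scan: walk the context once and record the best (lowest)
-- # priority of any keyword occurrence starting at each position, instead of
-- # asking "keyword in text" per branch.  Priorities mirror the intended ranking.
-- _KEYWORDS = [
--     ('owner', 0), ('proprietor', 0),
--     ('director', 1), ('managing', 1),
--     ('manager', 2), ('lead', 2),
--     ('founder', 3), ('established', 3),
--     ('ceo', 4), ('president', 4),
-- ]
-- _TITLES = ['Owner', 'Director', 'Manager', 'Founder', 'CEO', 'Executive']
--
-- def _extract_title_from_context(context: str, name: str) -> str: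
--     """Extract executive title from context (one left-to-right scan of the text)."""
--     cl = context.lower()
--     best = 5
--     for i in range(len(cl)):
--         for kw, p in _KEYWORDS:
--             if p < best and cl.startswith(kw, i):
--                 best = p
--     return _TITLES[best]
-- ===== Notes on version B (the rewrite author's own statement) =====
-- stated objective: alternative
-- what changed: Instead of testing 'keyword in context' branch by branch, B scans the lowered text left to right once, checking at each position which keywords start there and keeping the minimum priority, then indexes a title table with that priority.
import Mathlib
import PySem

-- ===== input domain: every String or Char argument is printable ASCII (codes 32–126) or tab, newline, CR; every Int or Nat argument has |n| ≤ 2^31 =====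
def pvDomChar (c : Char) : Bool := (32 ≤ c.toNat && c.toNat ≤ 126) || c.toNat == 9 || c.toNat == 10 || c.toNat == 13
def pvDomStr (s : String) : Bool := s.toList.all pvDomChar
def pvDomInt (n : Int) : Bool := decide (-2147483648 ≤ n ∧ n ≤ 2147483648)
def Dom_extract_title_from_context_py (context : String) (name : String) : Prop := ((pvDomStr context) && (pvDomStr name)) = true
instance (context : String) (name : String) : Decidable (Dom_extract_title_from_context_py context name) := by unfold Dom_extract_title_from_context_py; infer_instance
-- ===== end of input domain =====

-- B replaces A's keyword-driven 'substring in context' branch chain by one left-to-right scan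
-- of the lowered text keeping the minimum priority of any keyword starting at each position
-- (objective: alternative).

-- ===== PORT A =====
-- literal transliteration of A's if/elif chain
def extract_title_from_context_py (context : String) (_name : String) : String :=
  let context_lower := PySem.Str.lower context
  if ["owner", "proprietor"].any (fun w => PySem.Str.isIn w context_lower) then "Owner"
  else if ["director", "managing"].any (fun w => PySem.Str.isIn w context_lower) then "Director"
  else if ["manager", "lead"].any (fun w => PySem.Str.isIn w context_lower) then "Manager"
  else if ["founder", "established"].any (fun w => PySem.Str.isIn w context_lower) then "Founder"
  else if ["ceo", "president"].any (fun w => PySem.Str.isIn w context_lower) then "CEO"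
  else "Executive"

-- ===== PORT B =====
def pvKeywords : List (String × Nat) :=
  [("owner", 0), ("proprietor", 0),
   ("director", 1), ("managing", 1),
   ("manager", 2), ("lead", 2),
   ("founder", 3), ("established", 3),
   ("ceo", 4), ("president", 4)]

def pvTitles : List String := ["Owner", "Director", "Manager", "Founder", "CEO", "Executive"]

-- cl.startswith(kw, i) for 0 ≤ i ≤ len(cl) is exactly 'kw is a prefix of cl[i:]'
def extract_title_from_context_py_alt (context : String) (_name : String) : String :=
  let cl := (PySem.Str.lower context).toList
  let best := (List.range cl.length).foldl (fun best i =>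
    pvKeywords.foldl (fun best kwp =>
      if kwp.2 < best ∧ kwp.1.toList <+: cl.drop i then kwp.2 else best) best) 5
  pvTitles.getD best ""   -- best ≤ 5 always, so _TITLES[best] never raises

-- ===== PRECONDITION & SPEC =====
def Spec_extract_title_from_context_py (context : String) (name : String) (out : String) : Prop := out = extract_title_from_context_py_alt context name
instance (context : String) (name : String) (out : String) : Decidable (Spec_extract_title_from_context_py context name out) := by unfold Spec_extract_title_from_context_py; infer_instance

-- ===== CLAIM (what is proved, stated in full; the proofs are below) =====
def Claim_equal_extract_title_from_context_py : Prop := ∀ (context : String) (name : String), Dom_extract_title_from_context_py context name → Spec_extract_title_from_context_py context name (extract_title_from_context_py context name)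

-- ===== LEMMAS AND PROOFS =====

-- generic facts about the min-priority fold, for any element list, priority f and match condition c
theorem pvFold_le_init {α : Type} (l : List α) (f : α → Nat) (c : α → Prop) [DecidablePred c] (b : Nat) :
    l.foldl (fun b x => if f x < b ∧ c x then f x else b) b ≤ b := by
  induction l generalizing b with
  | nil => simp
  | cons x xs ih =>
    simp only [List.foldl_cons]
    split_ifs with h
    · exact le_trans (ih _) (le_of_lt h.1)
    · exact ih b

theorem pvFold_le_of_mem {α : Type} (l : List α) (f : α → Nat) (c : α → Prop) [DecidablePred c]
    (b : Nat) (x : α) (hx : x ∈ l) (hc : c x) :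
    l.foldl (fun b x => if f x < b ∧ c x then f x else b) b ≤ f x := by
  induction l generalizing b with
  | nil => cases hx
  | cons y ys ih =>
    simp only [List.foldl_cons]
    rcases List.mem_cons.mp hx with rfl | hmem
    · refine le_trans (pvFold_le_init _ _ _ _) ?_
      split_ifs with h
      · exact le_refl _
      · rcases Nat.lt_or_ge (f x) b with hlt | hge
        · exact absurd ⟨hlt, hc⟩ h
        · exact hge
    · exact ih _ hmem

theorem pvFold_cases {α : Type} (l : List α) (f : α → Nat) (c : α → Prop) [DecidablePred c] (b : Nat) :
    l.foldl (fun b x => if f x < b ∧ c x then f x else b) b = b ∨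
      ∃ x ∈ l, c x ∧ l.foldl (fun b x => if f x < b ∧ c x then f x else b) b = f x := by
  induction l generalizing b with
  | nil => left; rfl
  | cons y ys ih =>
    simp only [List.foldl_cons]
    split_ifs with h
    · rcases ih (f y) with h1 | ⟨x, hx, hc, he⟩
      · exact Or.inr ⟨y, List.mem_cons_self, h.2, h1⟩
      · exact Or.inr ⟨x, List.mem_cons_of_mem _ hx, hc, he⟩
    · rcases ih b with h1 | ⟨x, hx, hc, he⟩
      · exact Or.inl h1
      · exact Or.inr ⟨x, List.mem_cons_of_mem _ hx, hc, he⟩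

-- flatten the nested fold over positions × keywords into one fold
theorem pvFold_flatten (cl : List Char) (b : Nat) :
    (List.range cl.length).foldl (fun b i =>
        pvKeywords.foldl (fun b kwp =>
          if kwp.2 < b ∧ kwp.1.toList <+: cl.drop i then kwp.2 else b) b) b =
    ((List.range cl.length).flatMap (fun i => pvKeywords.map (fun kwp => (kwp, i)))).foldl
        (fun b x => if x.1.2 < b ∧ x.1.1.toList <+: cl.drop x.2 then x.1.2 else b) b := by
  induction (List.range cl.length) generalizing b with
  | nil => rfl
  | cons i is ih =>
    simp only [List.flatMap_cons, List.foldl_cons, List.foldl_append, List.foldl_map]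
    rw [ih]

-- for a nonempty keyword, occurrence at some scanned position ⟺ Python's 'kw in s'
theorem pvOcc_iff (kw : String) (s : String) (hkw : kw.toList ≠ []) :
    (∃ i ∈ List.range s.toList.length, kw.toList <+: s.toList.drop i) ↔
      PySem.Str.isIn kw s = true := by
  rw [PySem.Str.isIn_iff_infix]
  constructor
  · rintro ⟨i, _, hp⟩
    exact hp.isInfix.trans (List.drop_suffix i s.toList).isInfix
  · intro hinf
    rcases List.infix_iff_prefix_suffix.mp hinf with ⟨t, hpre, hsuf⟩
    obtain ⟨u, hu⟩ := hsuf
    have hlen : kw.toList.length ≤ t.length := hpre.length_le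
    have hne : kw.toList.length ≠ 0 := by
      intro h0
      exact hkw (List.length_eq_zero_iff.mp h0)
    refine ⟨u.length, ?_, ?_⟩
    · rw [List.mem_range, ← hu, List.length_append]
      omega
    · rw [← hu]
      simpa [List.drop_left] using hpre

-- ===== VERDICT (by name: the statement is the Claim_ definition above) =====
theorem extract_title_from_context_py_spec : Claim_equal_extract_title_from_context_py := by
  intro context name _
  unfold Spec_extract_title_from_context_py extract_title_from_context_py_alt extract_title_from_context_py
  simp only []
  set s := PySem.Str.lower context with hs
  set cl := s.toList with hcl
  rw [pvFold_flatten]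
  set L := (List.range cl.length).flatMap (fun i => pvKeywords.map (fun kwp => (kwp, i))) with hL
  set S := L.foldl (fun b x => if x.1.2 < b ∧ x.1.1.toList <+: cl.drop x.2 then x.1.2 else b) 5 with hS
  -- membership in the flattened list
  have hmemL : ∀ kw p i, ((kw, p), i) ∈ L ↔ (kw, p) ∈ pvKeywords ∧ i ∈ List.range cl.length := by
    intro kw p i
    simp only [hL, List.mem_flatMap, List.mem_map]
    constructor
    · rintro ⟨j, hj, kwp, hk, he⟩
      obtain ⟨h1, h2⟩ := Prod.mk.injEq .. ▸ he
      exact ⟨h1 ▸ hk, h2 ▸ hj⟩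
    · rintro ⟨hk, hi⟩
      exact ⟨i, hi, (kw, p), hk, rfl⟩
  -- upper bound: a keyword of priority p occurring somewhere forces S ≤ p
  have hub : ∀ kw p, (kw, p) ∈ pvKeywords → PySem.Str.isIn kw s = true → kw.toList ≠ [] → S ≤ p := by
    intro kw p hk hin hne
    rcases (pvOcc_iff kw s hne).mpr hin with ⟨i, hi, hp⟩
    exact pvFold_le_of_mem L (fun x => x.1.2) (fun x => x.1.1.toList <+: cl.drop x.2) 5
      ((kw, p), i) ((hmemL kw p i).mpr ⟨hk, hi⟩) hp
  -- exactness: S is 5 or the priority of some occurring keyword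
  have hex : S = 5 ∨ ∃ kw p, (kw, p) ∈ pvKeywords ∧ PySem.Str.isIn kw s = true ∧ S = p := by
    rcases pvFold_cases L (fun x => x.1.2) (fun x => x.1.1.toList <+: cl.drop x.2) 5 with h | ⟨x, hx, hc, he⟩
    · exact Or.inl h
    · obtain ⟨⟨kw, p⟩, i⟩ := x
      obtain ⟨hk, hi⟩ := (hmemL kw p i).mp hx
      have hne : kw.toList ≠ [] := by
        fin_cases hk <;> simp
      exact Or.inr ⟨kw, p, hk, (pvOcc_iff kw s hne).mp ⟨i, hi, hc⟩, he⟩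
  clear hmemL
  simp only [List.any_cons, List.any_nil, Bool.or_eq_true, Bool.false_eq_true, or_false]
  split_ifs with h1 h2 h3 h4 h5
  · -- Owner: some priority-0 keyword occurs, so S = 0
    have : S = 0 := by
      rcases h1 with h | h
      · exact Nat.le_zero.mp (hub "owner" 0 (by simp [pvKeywords]) h (by simp))
      · exact Nat.le_zero.mp (hub "proprietor" 0 (by simp [pvKeywords]) h (by simp))
    rw [this]; rfl
  · have hle : S ≤ 1 := by
      rcases h2 with h | h
      · exact hub "director" 1 (by simp [pvKeywords]) h (by simp)
      · exact hub "managing" 1 (by simp [pvKeywords]) h (by simp)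
    have : S = 1 := by
      rcases hex with h | ⟨kw, p, hk, hin, he⟩
      · omega
      · fin_cases hk <;> simp_all <;> omega
    rw [this]; rfl
  · have hle : S ≤ 2 := by
      rcases h3 with h | h
      · exact hub "manager" 2 (by simp [pvKeywords]) h (by simp)
      · exact hub "lead" 2 (by simp [pvKeywords]) h (by simp)
    have : S = 2 := by
      rcases hex with h | ⟨kw, p, hk, hin, he⟩
      · omega
      · fin_cases hk <;> simp_all <;> omega
    rw [this]; rfl
  · have hle : S ≤ 3 := by
      rcases h4 with h | h
      · exact hub "founder" 3 (by simp [pvKeywords]) h (by simp)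
      · exact hub "established" 3 (by simp [pvKeywords]) h (by simp)
    have : S = 3 := by
      rcases hex with h | ⟨kw, p, hk, hin, he⟩
      · omega
      · fin_cases hk <;> simp_all <;> omega
    rw [this]; rfl
  · have hle : S ≤ 4 := by
      rcases h5 with h | h
      · exact hub "ceo" 4 (by simp [pvKeywords]) h (by simp)
      · exact hub "president" 4 (by simp [pvKeywords]) h (by simp)
    have : S = 4 := by
      rcases hex with h | ⟨kw, p, hk, hin, he⟩
      · omega
      · fin_cases hk <;> simp_all
    rw [this]; rfl
  · have : S = 5 := by
      rcases hex with h | ⟨kw, p, hk, hin, he⟩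
      · exact h
      · fin_cases hk <;> simp_all
    rw [this]; rfl
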